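-- pv_equiv track=rewrite | github.com/glk1001/barks-compleat-reader | src/barks-fantagraphics/scraps/create-barks-title-modules.py | get_title_var
-- ===== SOURCE A (Python) =====
-- import string
--
-- def get_title_var(ttl: str) -> str:
--     ttl_var = ttl.upper()
--
--     ttl_var = ttl_var.replace(" ", "_")
--     ttl_var = ttl_var.replace("-", "_")
--
--     str_punc = string.punctuation
--     str_punc = str_punc.replace("_", "")
--     str_punc = str_punc.replace("-", "")
--     for punc in str_punc:
--         ttl_var = ttl_var.replace(punc, "")
--
--     if ttl_var.startswith("THE_"):
--         ttl_var = ttl_var[4:] + "_THE"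
--     elif ttl_var.startswith("A_"):
--         ttl_var = ttl_var[2:] + "_A"
--
--     return ttl_var
-- ===== SOURCE B (Python) =====
-- import string
--
--
-- def get_title_var(ttl: str) -> str:
--     # One translation table: ' '/'-' -> '_', other punctuation (except '_') deleted.
--     table = str.maketrans(
--         {" ": "_", "-": "_", **{c: None for c in string.punctuation if c not in "_-"}}
--     )
--     ttl_var = ttl.upper().translate(table)
--
--     if ttl_var.startswith("THE_"):
--         ttl_var = ttl_var[4:] + "_THE"
--     elif ttl_var.startswith("A_"):
--         ttl_var = ttl_var[2:] + "_A"
--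
--     return ttl_var
-- ===== Notes on version B (the rewrite author's own statement) =====
-- stated objective: idiomatic
-- what changed: Replaces A's 31 sequential .replace() scans over the string with one str.maketrans translation table (' '/'-' to '_', other punctuation except '_' deleted) applied in a single .translate() pass; prefix rearrangement unchanged.
import Mathlib
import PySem

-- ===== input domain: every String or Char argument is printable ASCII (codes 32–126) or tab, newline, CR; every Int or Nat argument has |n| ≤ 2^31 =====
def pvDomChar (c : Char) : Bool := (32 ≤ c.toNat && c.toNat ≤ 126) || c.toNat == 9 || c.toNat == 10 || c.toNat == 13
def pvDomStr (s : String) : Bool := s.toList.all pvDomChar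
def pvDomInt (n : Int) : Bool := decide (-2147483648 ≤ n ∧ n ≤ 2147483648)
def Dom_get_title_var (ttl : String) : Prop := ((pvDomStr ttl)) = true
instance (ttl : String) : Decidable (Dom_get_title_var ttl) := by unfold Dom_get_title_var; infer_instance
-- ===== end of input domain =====

-- B replaces A's 31 sequential .replace() scans by one translation table applied in a single
-- pass (str.maketrans/translate); the prefix rearrangement is unchanged. Objective: idiomatic.

-- string.punctuation (a library constant both versions read)
def pyPunctuation : List Char := "!\"#$%&'()*+,-./:;<=>?@[\\]^_`{|}~".toList

-- ===== PORT A =====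
-- str_punc = string.punctuation with '_' and '-' removed (by .replace, as A does)
def strPuncA : List Char :=
  PySem.Chars.replace (PySem.Chars.replace pyPunctuation ['_'] []) ['-'] []

def get_title_var (ttl : String) : String :=
  let v := PySem.Chars.upper ttl.toList
  let v := PySem.Chars.replace v [' '] ['_']
  let v := PySem.Chars.replace v ['-'] ['_']
  let v := strPuncA.foldl (fun v p => PySem.Chars.replace v [p] []) v
  let v :=
    if PySem.Chars.startswith v "THE_".toList then
      PySem.Chars.slice v (some 4) none ++ "_THE".toList
    else if PySem.Chars.startswith v "A_".toList then
      PySem.Chars.slice v (some 2) none ++ "_A".toList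
    else v
  String.ofList v

-- ===== PORT B =====
-- the deletion set of the maketrans table: punctuation except '_' and '-'
def delCharsB : List Char := pyPunctuation.filter (fun c => !(c == '_' || c == '-'))

-- the translation table as a function: ' '/'-' ↦ '_', deletion set ↦ none, else identity
def transChar (c : Char) : Option Char :=
  if c == ' ' || c == '-' then some '_'
  else if delCharsB.contains c then none
  else some c

def get_title_var_alt (ttl : String) : String :=
  let v := (PySem.Chars.upper ttl.toList).filterMap transChar   -- upper().translate(table)
  let v :=
    if PySem.Chars.startswith v "THE_".toList then v.drop 4 ++ "_THE".toList
    else if PySem.Chars.startswith v "A_".toList then v.drop 2 ++ "_A".toList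
    else v
  String.ofList v

-- ===== PRECONDITION & SPEC =====
def Spec_get_title_var (ttl : String) (out : String) : Prop := out = get_title_var_alt ttl
instance (ttl : String) (out : String) : Decidable (Spec_get_title_var ttl out) := by unfold Spec_get_title_var; infer_instance

-- ===== CLAIM (what is proved, stated in full; the proofs are below) =====
def Claim_equal_get_title_var : Prop := ∀ (ttl : String), Dom_get_title_var ttl → Spec_get_title_var ttl (get_title_var ttl)

-- ===== LEMMAS AND PROOFS =====

-- replace with a single-char pattern acts independently on each character
theorem replace_go_single (a : Char) (new : List Char) :
    ∀ (fuel : Nat) (l acc : List Char), l.length ≤ fuel →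
      PySem.Chars.replace.go [a] new fuel l acc
        = acc.reverse ++ l.flatMap (fun c => if c = a then new else [c]) := by
  intro fuel
  induction fuel with
  | zero =>
    intro l acc h
    have : l = [] := List.length_eq_zero_iff.mp (Nat.le_zero.mp h)
    subst this
    simp [PySem.Chars.replace.go]
  | succ n ih =>
    intro l acc h
    cases l with
    | nil => simp [PySem.Chars.replace.go]
    | cons c t =>
      simp only [PySem.Chars.replace.go]
      by_cases hc : c = a
      · subst hc
        have hp : List.isPrefixOf [c] (c :: t) = true := by
          simp [List.isPrefixOf]
        rw [if_pos hp]
        simp only [List.length_cons] at h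
        rw [ih _ _ (by simpa using Nat.lt_succ_iff.mp (Nat.lt_of_lt_of_le (Nat.lt_succ_self _) h))]
        simp
      · have hp : List.isPrefixOf [a] (c :: t) = false := by
          simp [List.isPrefixOf]
          intro h'; exact (hc h'.symm).elim
        rw [if_neg (by simp [hp])]
        simp only [List.length_cons] at h
        rw [ih t (c :: acc) (Nat.le_of_succ_le_succ h)]
        simp [hc]

theorem replace_single (a : Char) (new l : List Char) :
    PySem.Chars.replace l [a] new
      = l.flatMap (fun c => if c = a then new else [c]) := by
  simp only [PySem.Chars.replace, List.isEmpty_cons, Bool.false_eq_true, if_false]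
  exact replace_go_single a new l.length l [] le_rfl

theorem replace_single_char (a b : Char) (l : List Char) :
    PySem.Chars.replace l [a] [b] = l.map (fun c => if c = a then b else c) := by
  rw [replace_single]
  induction l with
  | nil => rfl
  | cons c t ih => by_cases hc : c = a <;> simp [hc, ih]

theorem replace_single_del (a : Char) (l : List Char) :
    PySem.Chars.replace l [a] [] = l.filter (fun c => !(c == a)) := by
  rw [replace_single]
  induction l with
  | nil => rfl
  | cons c t ih => by_cases hc : c = a <;> simp [hc, ih]

-- the punctuation-deleting loop is one filter against the whole set
theorem foldl_replace_del (ds : List Char) :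
    ∀ (v : List Char),
      ds.foldl (fun v p => PySem.Chars.replace v [p] []) v
        = v.filter (fun c => !ds.contains c) := by
  induction ds with
  | nil => intro v; simp
  | cons d t ih =>
    intro v
    simp only [List.foldl_cons]
    rw [replace_single_del, ih, List.filter_filter]
    apply List.filter_congr
    intro c _
    by_cases h : c = d <;> simp [h]

-- A's str_punc equals B's deletion set (both concrete lists)
theorem strPuncA_eq : strPuncA = delCharsB := by decide

-- the core pipelines agree
theorem core_eq (u : List Char) :
    (strPuncA.foldl (fun v p => PySem.Chars.replace v [p] [])
        (PySem.Chars.replace (PySem.Chars.replace u [' '] ['_']) ['-'] ['_']))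
      = u.filterMap transChar := by
  rw [replace_single_char, replace_single_char, foldl_replace_del, strPuncA_eq]
  induction u with
  | nil => rfl
  | cons c t ih =>
    have ih' : List.filter (fun c => !decide (c ∈ delCharsB))
        (List.map ((fun c => if c = '-' then '_' else c) ∘ fun c => if c = ' ' then '_' else c) t)
        = List.filterMap transChar t := by simpa [Function.comp] using ih
    by_cases h1 : c = ' '
    · subst h1
      have hu : ('_' : Char) ∉ delCharsB := by decide
      have ht : transChar ' ' = some '_' := by decide
      simp [hu, ht, ih']
    · by_cases h2 : c = '-'
      · subst h2
        have hu : ('_' : Char) ∉ delCharsB := by decide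
        have ht : transChar '-' = some '_' := by decide
        simp [hu, ht, ih']
      · by_cases hm : c ∈ delCharsB
        · have ht : transChar c = none := by simp [transChar, h1, h2, hm]
          simp [h1, h2, hm, ht, ih']
        · have ht : transChar c = some c := by simp [transChar, h1, h2, hm]
          simp [h1, h2, hm, ht, ih']

-- slices with a small nonnegative numeral start are drops
theorem slice_four (v : List Char) : PySem.Chars.slice v (some 4) none = v.drop 4 := by
  simp [pysem]
theorem slice_two (v : List Char) : PySem.Chars.slice v (some 2) none = v.drop 2 := by
  simp [pysem]

-- ===== VERDICT (by name: the statement is the Claim_ definition above) =====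
theorem get_title_var_spec : Claim_equal_get_title_var := by
  intro ttl _
  unfold Spec_get_title_var get_title_var get_title_var_alt
  simp only []
  rw [core_eq, slice_four, slice_two]
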